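-- pv_equiv track=rewrite | github.com/gabolope/30daysofPython | day_14_higher_order_functions/day_14.py | countries_letters
-- ===== SOURCE A (Python) =====
-- def countries_letters(lt):
--     letters = dict()
--     for i in lt:
--         first_letter = i[0]
--         if first_letter not in letters:
--             letters[first_letter] = 1
--         else:
--             letters[first_letter] += 1
--     return letters
-- ===== SOURCE B (Python) =====
-- def countries_letters(lt):
--     firsts = [s[0] for s in lt]
--     seen = []
--     pairs = []
--     for c in firsts:
--         if c not in seen:
--             seen.append(c)
--             pairs.append((c, firsts.count(c)))
--     return dict(pairs)
-- ===== Notes on version B (the rewrite author's own statement) =====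
-- stated objective: alternative
-- what changed: B materialises the list of first letters, collects its first occurrences into a 'seen' list while emitting (letter, full list.count scan) pairs, and builds the dict from the pair list at the end, instead of A's single incremental membership-test-and-increment pass over a dict.
import Mathlib
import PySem

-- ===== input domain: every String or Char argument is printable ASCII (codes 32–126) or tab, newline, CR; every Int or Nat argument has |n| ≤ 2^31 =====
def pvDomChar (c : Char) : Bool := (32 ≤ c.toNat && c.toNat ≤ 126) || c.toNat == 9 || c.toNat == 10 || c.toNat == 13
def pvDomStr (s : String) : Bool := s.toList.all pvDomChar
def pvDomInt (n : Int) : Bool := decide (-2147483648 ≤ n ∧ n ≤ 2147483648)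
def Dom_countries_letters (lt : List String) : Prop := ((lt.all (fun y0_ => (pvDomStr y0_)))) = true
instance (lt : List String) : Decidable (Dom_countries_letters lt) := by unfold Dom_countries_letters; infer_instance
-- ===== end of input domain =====

-- B rebuilds the result by structural recursion with a 'seen' accumulator and per-key count scans instead of A's incremental dict pass; same values (no speed claim).


-- ===== PORT A =====
-- i[0] in Python: a 1-character string; PySem.Str.pyGet? returns the Char, wrapped back
-- into a String; the .getD "" default is unreachable under Pre_ (no empty strings).
def pvFirstA (i : String) : String :=
  ((PySem.Str.pyGet? i 0).map (fun c => String.ofList [c])).getD ""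

def countries_letters (lt : List String) : List (String × Int) :=
  (lt.foldl (fun (letters : PySem.Dict String Int) i =>
      let first_letter := pvFirstA i
      match letters.get? first_letter with
      | none => letters.insert first_letter 1
      | some v => letters.insert first_letter (v + 1))
    PySem.Dict.empty).items

-- ===== PORT B =====
-- Source B's loop over firsts with state (seen, pairs); the pairs' keys are pairwise
-- distinct first occurrences, so dict(pairs) is the pair list itself in order.
def countries_letters_alt (lt : List String) : List (String × Int) :=
  let firsts := lt.map (fun s => ((PySem.Str.pyGet? s 0).map (fun c => String.ofList [c])).getD "")
  (firsts.foldl (fun (st : List String × List (String × Int)) c =>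
      if c ∈ st.1 then st
      else (st.1 ++ [c], st.2 ++ [(c, (firsts.count c : Int))]))
    ([], [])).2

-- ===== PRECONDITION & SPEC =====
-- Pre_ excludes lists containing the empty string, on which A raises IndexError at i[0].
def Pre_countries_letters (lt : List String) : Prop := ∀ s ∈ lt, s ≠ ""
instance (lt : List String) : Decidable (Pre_countries_letters lt) := by
  unfold Pre_countries_letters; infer_instance

def pvWitness_countries_letters : List String := ["Finland", "France", "fiji", "Spain"]

def Spec_countries_letters (lt : List String) (out : List (String × Int)) : Prop :=
  out = countries_letters_alt lt
instance (lt : List String) (out : List (String × Int)) : Decidable (Spec_countries_letters lt out) := by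
  unfold Spec_countries_letters; infer_instance

-- ===== CLAIM (what is proved, stated in full; the proofs are below) =====
def Claim_equal_countries_letters : Prop :=
  ∀ (lt : List String), Dom_countries_letters lt → Pre_countries_letters lt →
    Spec_countries_letters lt (countries_letters lt)

-- ===== LEMMAS AND PROOFS =====

-- A's branching update is exactly the getD-based counting insert.
theorem countries_letters_eq_counter_items (lt : List String) :
    countries_letters lt = (PySem.Dict.counter (lt.map pvFirstA)).items := by
  unfold countries_letters
  rw [← PySem.Dict.foldl_insert_getD_add_one_eq_counter, List.foldl_map]
  have hfun : (fun (letters : PySem.Dict String Int) i =>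
      let first_letter := pvFirstA i
      match letters.get? first_letter with
      | none => letters.insert first_letter 1
      | some v => letters.insert first_letter (v + 1)) =
      (fun (x : PySem.Dict String Int) (y : String) =>
        x.insert (pvFirstA y) (x.getD (pvFirstA y) 0 + 1)) := by
    funext d i
    rcases h : d.get? (pvFirstA i) with _ | v
    · simp [h, PySem.Dict.getD_eq_get?_getD]
    · simp [h, PySem.Dict.getD_eq_get?_getD]
  rw [hfun]

-- Proof-only recursive form of B's loop: recursion over the list with a 'seen' accumulator.
def pvAltBuild (firsts : List String) : List String → List String → List (String × Int)
  | [], _ => []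
  | c :: tail, seen =>
    if c ∈ seen then pvAltBuild firsts tail seen
    else (c, (firsts.count c : Int)) :: pvAltBuild firsts tail (seen ++ [c])

-- B's foldl with (seen, pairs) state = the recursive form, appended to the pairs so far.
theorem foldl_eq_pvAltBuild (F : List String) (xs : List String) :
    ∀ (seen : List String) (pairs : List (String × Int)),
      (xs.foldl (fun (st : List String × List (String × Int)) c =>
          if c ∈ st.1 then st
          else (st.1 ++ [c], st.2 ++ [(c, (F.count c : Int))])) (seen, pairs)).2 =
        pairs ++ pvAltBuild F xs seen := by
  induction xs with
  | nil => intro seen pairs; simp [pvAltBuild]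
  | cons c xs ih =>
    intro seen pairs
    by_cases hc : c ∈ seen
    · simp [pvAltBuild, hc, ih]
    · simp [pvAltBuild, hc, ih]

-- Set.add only ever appends: the accumulator stays a prefix, new elements avoid it.
theorem foldl_add_prefix (xs acc : List String) :
    ∃ t, List.foldl PySem.Set.add acc xs = acc ++ t ∧ ∀ a ∈ t, a ∉ acc := by
  induction xs generalizing acc with
  | nil => exact ⟨[], by simp⟩
  | cons c xs ih =>
    by_cases hc : c ∈ acc
    · simpa [PySem.Set.add, PySem.Set.contains, hc] using ih acc
    · obtain ⟨t, ht, hmem⟩ := ih (acc ++ [c])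
      refine ⟨c :: t, ?_, ?_⟩
      · simp [PySem.Set.add, PySem.Set.contains, hc, ht]
      · intro a ha hacc
        rcases List.mem_cons.mp ha with rfl | ha'
        · exact hc hacc
        · exact hmem a ha' (by simp [hacc])

-- B's recursion = the first-occurrence keys of the Set fold, mapped to counting pairs.
theorem pvAltBuild_eq_filter (F xs : List String) :
    ∀ acc, pvAltBuild F xs acc =
      ((List.foldl PySem.Set.add acc xs).filter (fun a => decide (a ∉ acc))).map
        (fun k => (k, (F.count k : Int))) := by
  induction xs with
  | nil =>
    intro acc
    simp [pvAltBuild, List.filter_eq_nil_iff]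
  | cons c xs ih =>
    intro acc
    by_cases hc : c ∈ acc
    · simp only [pvAltBuild, if_pos hc, List.foldl_cons,
        PySem.Set.add, PySem.Set.contains]
      simp [hc, ih acc]
    · obtain ⟨t, ht, hmem⟩ := foldl_add_prefix xs (acc ++ [c])
      have htail : pvAltBuild F xs (acc ++ [c]) =
          t.map (fun k => (k, (F.count k : Int))) := by
        rw [ih (acc ++ [c]), ht]
        congr 1
        rw [List.filter_append]
        have h1 : (acc ++ [c]).filter (fun a => decide (a ∉ acc ++ [c])) = [] := by
          rw [List.filter_eq_nil_iff]
          intro a ha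
          simp only [decide_eq_true_eq, not_not]
          exact ha
        have h2 : t.filter (fun a => decide (a ∉ acc ++ [c])) = t :=
          List.filter_eq_self.mpr (by intro a ha; simpa using hmem a ha)
        rw [h1, h2, List.nil_append]
      simp only [pvAltBuild, if_neg hc, List.foldl_cons,
        PySem.Set.add, PySem.Set.contains]
      rw [if_neg (by simpa using hc : ¬ (acc.contains c = true)), ht]
      rw [List.filter_append, List.filter_append]
      have hacc0 : acc.filter (fun a => decide (a ∉ acc)) = [] := by
        simp [List.filter_eq_nil_iff]
      have hc0 : [c].filter (fun a => decide (a ∉ acc)) = [c] := by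
        simp [hc]
      have ht0 : t.filter (fun a => decide (a ∉ acc)) = t :=
        List.filter_eq_self.mpr (by
          intro a ha
          simp only [decide_eq_true_eq]
          intro hin
          exact hmem a ha (by simp [hin]))
      rw [hacc0, hc0, ht0, htail]
      simp

theorem countries_letters_alt_eq_map (lt : List String) :
    countries_letters_alt lt =
      (PySem.Set.ofList (lt.map pvFirstA)).map
        (fun k => (k, ((lt.map pvFirstA).count k : Int))) := by
  unfold countries_letters_alt
  have hF : (lt.map (fun s => ((PySem.Str.pyGet? s 0).map
      (fun c => String.ofList [c])).getD "")) = lt.map pvFirstA := rfl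
  rw [hF, foldl_eq_pvAltBuild (lt.map pvFirstA) (lt.map pvFirstA) [] [], List.nil_append,
    pvAltBuild_eq_filter (lt.map pvFirstA) (lt.map pvFirstA) []]
  rw [PySem.Set.ofList_eq_foldl]
  congr 1
  exact List.filter_eq_self.mpr (by simp)

-- ===== VERDICT (by name: the statement is the Claim_ definition above) =====
theorem countries_letters_spec : Claim_equal_countries_letters := by
  intro lt _ _
  unfold Spec_countries_letters
  rw [countries_letters_eq_counter_items, PySem.Dict.items_counter,
    countries_letters_alt_eq_map]
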